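-- pv_equiv track=rewrite | github.com/tmactong/AMMM-project | src/project/heuristics/__init__.py | get_local_search_edge_colors
-- ===== SOURCE A (Python) =====
-- import typing as t
--
-- def get_local_search_edge_colors(
--         edges: t.List[t.Tuple[int, int]], cycles: t.Optional[t.List[t.List[int]]] = None):
--     if cycles:
--         red_edges = set()
--         for cycle in cycles:
--             cycle.append(cycle[0])
--             for i in range(len(cycle)-1):
--                 red_edges.add((cycle[i], cycle[i+1]))
--         edge_colors = ['red' if edge in red_edges else 'blue' for edge in edges]
--     else:
--         edge_colors = ['blue' for _ in edges]
--     return edge_colors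
-- ===== SOURCE B (Python) =====
-- import typing as t
--
-- def get_local_search_edge_colors(
--         edges: t.List[t.Tuple[int, int]], cycles: t.Optional[t.List[t.List[int]]] = None):
--     colors = ['blue'] * len(edges)
--     if cycles:
--         positions = {}
--         for j, edge in enumerate(edges):
--             positions.setdefault(edge, []).append(j)
--         for cycle in cycles:
--             cycle.append(cycle[0])
--             for i in range(len(cycle) - 1):
--                 for j in positions.get((cycle[i], cycle[i + 1]), ()):
--                     colors[j] = 'red'
--     return colors
-- ===== Notes on version B (the rewrite author's own statement) =====
-- stated objective: faster
-- what changed: Inverts A's build-a-red-edge-set-then-look-up-every-edge strategy into a scatter: one pass indexes each edge's positions in a dict, then walking the closed cycles' consecutive pairs writes 'red' directly into a preallocated all-'blue' colors list.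
import Mathlib
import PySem

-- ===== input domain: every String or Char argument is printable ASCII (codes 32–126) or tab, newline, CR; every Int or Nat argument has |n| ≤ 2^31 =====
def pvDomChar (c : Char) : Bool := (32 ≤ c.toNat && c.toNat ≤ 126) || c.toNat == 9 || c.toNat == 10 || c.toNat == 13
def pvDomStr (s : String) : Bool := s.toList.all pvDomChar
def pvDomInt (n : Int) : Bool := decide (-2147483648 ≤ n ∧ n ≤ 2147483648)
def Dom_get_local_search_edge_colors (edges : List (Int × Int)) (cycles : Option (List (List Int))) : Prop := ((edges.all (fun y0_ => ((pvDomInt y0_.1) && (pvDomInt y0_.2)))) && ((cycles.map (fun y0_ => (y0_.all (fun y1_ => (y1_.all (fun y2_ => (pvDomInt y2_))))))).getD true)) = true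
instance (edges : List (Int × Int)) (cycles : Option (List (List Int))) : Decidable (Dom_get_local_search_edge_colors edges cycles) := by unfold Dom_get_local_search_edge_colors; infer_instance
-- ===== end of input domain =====

-- B replaces A's build-a-red-edge-set-then-lookup by the inverse (scatter) strategy: index each
-- edge's positions once in a dict, then mark positions red while walking the closed cycles'
-- consecutive pairs; A and B both mutate each cycle in place by appending its first element —
-- the equivalence proved is about the return value.


-- ===== PORT A =====
-- red_edges = set(); for cycle in cycles: cycle.append(cycle[0]); for i in range(len(cycle)-1): red_edges.add((cycle[i], cycle[i+1]))
def pvRedEdges (cs : List (List Int)) : PySem.Set (Int × Int) :=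
  cs.foldl (fun s c =>
    let c' := c ++ [c.getD 0 0]   -- cycle.append(cycle[0]); cycle nonempty under Pre_, so getD is exact
    (List.range (c'.length - 1)).foldl
      (fun s i => PySem.Set.add s (c'.getD i 0, c'.getD (i+1) 0)) s)  -- indices always in range
    PySem.Set.empty

def get_local_search_edge_colors (edges : List (Int × Int)) (cycles : Option (List (List Int))) : List String :=
  match cycles with
  | some cs =>
      if cs.isEmpty then
        edges.map (fun _ => "blue")
      else
        let red := pvRedEdges cs
        edges.map (fun e => if PySem.Set.contains red e then "red" else "blue")
  | none => edges.map (fun _ => "blue")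

-- ===== PORT B =====
-- positions = {}; for j, edge in enumerate(edges): positions.setdefault(edge, []).append(j)
-- (setdefault + in-place append == d[edge] = d.get(edge, []) + [j], i.e. Dict.modify)
def pvPositions (edges : List (Int × Int)) : PySem.Dict (Int × Int) (List Int) :=
  (PySem.List.enumerate edges).foldl
    (fun d je => d.modify je.2 [] (fun l => l ++ [je.1])) PySem.Dict.empty

-- for j in positions.get(p, ()): colors[j] = 'red'   (every stored j is a valid index)
def pvMark (positions : PySem.Dict (Int × Int) (List Int)) (colors : List String) (p : Int × Int) : List String :=
  (positions.getD p []).foldl (fun cs j => PySem.List.pySetD cs j "red") colors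

def get_local_search_edge_colors_alt (edges : List (Int × Int)) (cycles : Option (List (List Int))) : List String :=
  let colors := edges.map (fun _ => "blue")   -- colors = ['blue'] * len(edges)
  match cycles with
  | some cs =>
      if cs.isEmpty then colors
      else
        let positions := pvPositions edges
        cs.foldl (fun colors c =>
          let c' := c ++ [c.getD 0 0]   -- cycle.append(cycle[0]); cycle nonempty under Pre_, so getD is exact
          (List.range (c'.length - 1)).foldl
            (fun colors i => pvMark positions colors (c'.getD i 0, c'.getD (i+1) 0)) colors) colors
  | none => colors

-- ===== PRECONDITION & SPEC =====
-- Pre_ excludes a truthy cycles list containing an empty cycle: there cycle[0] raises IndexError in both A and B.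
def Pre_get_local_search_edge_colors (edges : List (Int × Int)) (cycles : Option (List (List Int))) : Prop :=
  ∀ c ∈ cycles.getD [], c ≠ []
instance (edges : List (Int × Int)) (cycles : Option (List (List Int))) : Decidable (Pre_get_local_search_edge_colors edges cycles) := by unfold Pre_get_local_search_edge_colors; infer_instance

def pvWitness_get_local_search_edge_colors : (List (Int × Int)) × Option (List (List Int)) :=
  ([(1, 2), (2, 3), (3, 1), (1, 3)], some [[1, 2, 3]])

def Spec_get_local_search_edge_colors (edges : List (Int × Int)) (cycles : Option (List (List Int))) (out : List String) : Prop := out = get_local_search_edge_colors_alt edges cycles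
instance (edges : List (Int × Int)) (cycles : Option (List (List Int))) (out : List String) : Decidable (Spec_get_local_search_edge_colors edges cycles out) := by unfold Spec_get_local_search_edge_colors; infer_instance

-- ===== CLAIM (what is proved, stated in full; the proofs are below) =====
def Claim_equal_get_local_search_edge_colors : Prop := ∀ (edges : List (Int × Int)) (cycles : Option (List (List Int))), Dom_get_local_search_edge_colors edges cycles → Pre_get_local_search_edge_colors edges cycles → Spec_get_local_search_edge_colors edges cycles (get_local_search_edge_colors edges cycles)

-- ===== LEMMAS AND PROOFS =====

-- the flat list of consecutive pairs of all closed cycles (proof abbreviation)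
def pvRedPairs (cs : List (List Int)) : List (Int × Int) :=
  cs.flatMap (fun c =>
    let c' := c ++ [c.getD 0 0]
    (List.range (c'.length - 1)).map (fun i => (c'.getD i 0, c'.getD (i+1) 0)))

-- membership in a set built by folding `add` of images over a list
theorem mem_foldl_add {α β : Type} [BEq α] [LawfulBEq α] (l : List β) (f : β → α) (s : PySem.Set α) (e : α) :
    e ∈ l.foldl (fun s i => PySem.Set.add s (f i)) s ↔ e ∈ s ∨ ∃ i ∈ l, f i = e := by
  induction l generalizing s with
  | nil => simp
  | cons x xs ih =>
      simp only [List.foldl_cons, ih, PySem.Set.mem_add, List.mem_cons]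
      constructor
      · rintro ((h | h) | ⟨i, hi, rfl⟩)
        · exact Or.inl h
        · exact Or.inr ⟨x, Or.inl rfl, h.symm⟩
        · exact Or.inr ⟨i, Or.inr hi, rfl⟩
      · rintro (h | ⟨i, (rfl | hi), rfl⟩)
        · exact Or.inl (Or.inl h)
        · exact Or.inl (Or.inr rfl)
        · exact Or.inr ⟨i, hi, rfl⟩

-- A's red-edge set contains exactly the consecutive pairs of the closed cycles
theorem mem_pvRedEdges (cs : List (List Int)) (e : Int × Int) :
    e ∈ pvRedEdges cs ↔ e ∈ pvRedPairs cs := by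
  unfold pvRedEdges pvRedPairs
  suffices h : ∀ s : PySem.Set (Int × Int),
      e ∈ cs.foldl (fun s c =>
            let c' := c ++ [c.getD 0 0]
            (List.range (c'.length - 1)).foldl
              (fun s i => PySem.Set.add s (c'.getD i 0, c'.getD (i+1) 0)) s) s
        ↔ e ∈ s ∨ ∃ c ∈ cs, ∃ i ∈ List.range ((c ++ [c.getD 0 0]).length - 1),
            ((c ++ [c.getD 0 0]).getD i 0, (c ++ [c.getD 0 0]).getD (i+1) 0) = e by
    rw [h PySem.Set.empty]
    simp [PySem.Set.empty, List.mem_flatMap, eq_comm]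
  induction cs with
  | nil => simp
  | cons c cs ih =>
      intro s
      simp only [List.foldl_cons, ih, List.mem_cons]
      rw [mem_foldl_add]
      constructor
      · rintro ((h | ⟨i, hi, hf⟩) | ⟨c₀, hc₀, hh⟩)
        · exact Or.inl h
        · exact Or.inr ⟨c, Or.inl rfl, i, hi, hf⟩
        · exact Or.inr ⟨c₀, Or.inr hc₀, hh⟩
      · rintro (h | ⟨c₀, (rfl | hc₀), hh⟩)
        · exact Or.inl (Or.inl h)
        · exact Or.inl (Or.inr hh)
        · exact Or.inr ⟨c₀, hc₀, hh⟩

-- the positions dict groups indices by edge value, in order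
theorem getD_pvPositions (edges : List (Int × Int)) (p : Int × Int) :
    (pvPositions edges).getD p []
      = ((PySem.List.enumerate edges).filter (fun je => je.2 == p)).map (fun je => je.1) := by
  unfold pvPositions
  have h : (PySem.List.enumerate edges).foldl
      (fun d je => d.modify je.2 [] (fun l => l ++ [je.1])) PySem.Dict.empty
    = ((PySem.List.enumerate edges).map (fun je => (je.2, je.1))).foldl
      (fun d q => d.modify q.1 [] (fun l => l ++ [q.2])) PySem.Dict.empty := by
    rw [List.foldl_map]
  rw [h, PySem.Dict.getD_foldl_modify_append]
  simp [List.filter_map, List.map_map, Function.comp_def]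

-- a natural-number index is stored under p iff edges[k] is p
theorem natCast_mem_pvPositions (edges : List (Int × Int)) (p : Int × Int) (k : Nat) :
    ((k : Int) ∈ (pvPositions edges).getD p []) ↔ edges[k]? = some p := by
  rw [getD_pvPositions]
  simp only [List.mem_map, List.mem_filter, PySem.List.mem_enumerate_iff, beq_iff_eq]
  constructor
  · rintro ⟨je, ⟨⟨m, hm, rfl⟩, hp⟩, hk⟩
    simp only [zero_add] at hk hp ⊢
    have : k = m := by exact_mod_cast hk.symm
    subst this
    simp [List.getElem?_eq_getElem hm, hp]
  · intro h
    have hk : k < edges.length := by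
      by_contra hk
      simp [List.getElem?_eq_none (by omega : edges.length ≤ k)] at h
    refine ⟨((k : Int), edges[k]), ⟨⟨k, hk, by simp⟩, ?_⟩, rfl⟩
    have := List.getElem?_eq_getElem hk ▸ h
    simpa using (Option.some.inj this)

-- every stored index is a valid (nonnegative, in-range) position
theorem mem_pvPositions_valid (edges : List (Int × Int)) (p : Int × Int) (j : Int)
    (h : j ∈ (pvPositions edges).getD p []) : 0 ≤ j ∧ j < (edges.length : Int) := by
  rw [getD_pvPositions] at h
  simp only [List.mem_map, List.mem_filter, PySem.List.mem_enumerate_iff] at h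
  obtain ⟨je, ⟨⟨m, hm, rfl⟩, _⟩, hj⟩ := h
  subst hj
  simp only [zero_add]
  constructor <;> [exact_mod_cast Int.natCast_nonneg m; exact_mod_cast hm]

-- length is preserved by a marking loop
theorem length_foldl_pySetD (js : List Int) (colors : List String) :
    (js.foldl (fun cs j => PySem.List.pySetD cs j "red") colors).length = colors.length := by
  induction js generalizing colors with
  | nil => rfl
  | cons j js ih => rw [List.foldl_cons, ih, PySem.List.length_pySetD]

-- effect of a marking loop on one cell
theorem getElem?_foldl_pySetD (js : List Int) (colors : List String)
    (hjs : ∀ j ∈ js, 0 ≤ j ∧ j < (colors.length : Int)) (k : Nat) :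
    (js.foldl (fun cs j => PySem.List.pySetD cs j "red") colors)[k]?
      = if (k : Int) ∈ js then some "red" else colors[k]? := by
  induction js generalizing colors with
  | nil => simp
  | cons j js ih =>
      obtain ⟨hj0, hjlt⟩ := hjs j (List.mem_cons_self)
      rw [List.foldl_cons, PySem.List.pySetD_of_nonneg _ _ hj0]
      have hlen : (colors.set j.toNat "red").length = colors.length := List.length_set
      rw [ih _ (by intro x hx; rw [hlen]; exact hjs x (List.mem_cons_of_mem _ hx))]
      by_cases hkj : (k : Int) ∈ js
      · simp [hkj, List.mem_cons]
      · simp only [hkj, if_false, List.mem_cons]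
        by_cases hk : (k : Int) = j
        · have hkn : j.toNat = k := by omega
          subst hkn
          simp [List.getElem?_set_self (by omega : j.toNat < colors.length), hk]
        · have : j.toNat ≠ k := by omega
          simp [List.getElem?_set_ne this, hk]

-- effect of marking a whole list of pairs
theorem getElem?_markAll (edges : List (Int × Int)) (ps : List (Int × Int)) (colors : List String)
    (hlen : colors.length = edges.length) (k : Nat) :
    (ps.foldl (pvMark (pvPositions edges)) colors)[k]?
      = if ∃ p ∈ ps, edges[k]? = some p then some "red" else colors[k]? := by
  induction ps generalizing colors with
  | nil => simp
  | cons p ps ih =>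
      rw [List.foldl_cons]
      have hmark_len : (pvMark (pvPositions edges) colors p).length = colors.length :=
        length_foldl_pySetD _ _
      have hmark : (pvMark (pvPositions edges) colors p)[k]?
          = if edges[k]? = some p then some "red" else colors[k]? := by
        unfold pvMark
        rw [getElem?_foldl_pySetD _ _ (fun j hj => by
          rw [hlen]; exact mem_pvPositions_valid edges p j hj)]
        simp only [natCast_mem_pvPositions]
      rw [ih _ (hmark_len.trans hlen), hmark]
      by_cases hps : ∃ q ∈ ps, edges[k]? = some q
      · have hcons : ∃ q ∈ p :: ps, edges[k]? = some q := by
          obtain ⟨q, hq, hqe⟩ := hps; exact ⟨q, List.mem_cons_of_mem _ hq, hqe⟩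
        rw [if_pos hps, if_pos hcons]
      · rw [if_neg hps]
        by_cases hp : edges[k]? = some p
        · have hcons : ∃ q ∈ p :: ps, edges[k]? = some q := ⟨p, List.mem_cons_self, hp⟩
          rw [if_pos hp, if_pos hcons]
        · have hcons : ¬ ∃ q ∈ p :: ps, edges[k]? = some q := by
            rintro ⟨q, hq, hqe⟩
            rcases List.mem_cons.mp hq with rfl | hq'
            · exact hp hqe
            · exact hps ⟨q, hq', hqe⟩
          rw [if_neg hp, if_neg hcons]

-- B's nested loops are the flat marking loop over all pairs
theorem nested_eq_flat (positions : PySem.Dict (Int × Int) (List Int)) (cs : List (List Int))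
    (colors : List String) :
    cs.foldl (fun colors c =>
        let c' := c ++ [c.getD 0 0]
        (List.range (c'.length - 1)).foldl
          (fun colors i => pvMark positions colors (c'.getD i 0, c'.getD (i+1) 0)) colors) colors
    = (pvRedPairs cs).foldl (pvMark positions) colors := by
  unfold pvRedPairs
  induction cs generalizing colors with
  | nil => rfl
  | cons c cs ih =>
      simp only [List.flatMap_cons, List.foldl_append, List.foldl_cons]
      rw [← ih, List.foldl_map]

-- ===== VERDICT (by name: the statement is the Claim_ definition above) =====
theorem get_local_search_edge_colors_spec : Claim_equal_get_local_search_edge_colors := by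
  intro edges cycles _ _
  unfold Spec_get_local_search_edge_colors get_local_search_edge_colors get_local_search_edge_colors_alt
  cases cycles with
  | none => rfl
  | some cs =>
      by_cases h : cs.isEmpty
      · simp only [h, if_true]
      · simp only [h, Bool.false_eq_true, if_false]
        rw [nested_eq_flat]
        apply List.ext_getElem?
        intro k
        rw [getElem?_markAll edges (pvRedPairs cs) _ (by simp) k]
        rcases hke : edges[k]? with _ | e
        · rw [List.getElem?_map, List.getElem?_map, hke]
          simp
        · rw [List.getElem?_map, List.getElem?_map, hke]
          by_cases hmem : e ∈ pvRedPairs cs <;>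
            simp [mem_pvRedEdges, hmem]
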